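-- pv_equiv track=rewrite | github.com/Abjad/abjad | trunk/abjad/tools/mathtools/cumulative_sums_zero.py | cumulative_sums_zero
-- ===== SOURCE A (Python) =====
-- def cumulative_sums_zero(l):
--    '''Return a list of the cumulative sums of the elements in *l*,
--    starting with ``0``.
--
--    .. note:: ``len(mathtools.cumulative_sums_zero(l)) == len(l) + 1``.
--
--    ::
--
--       abjad> mathtools.cumulative_sums_zero([1, 2, 3, 4, 5, 6, 7, 8])
--       [0, 1, 3, 6, 10, 15, 21, 28, 36]
--
--    ::
--
--       abjad> mathtools.cumulative_sums_zero([1, -2, 3, -4, 5, -6, 7, -8])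
--       [0, 1, -1, 2, -2, 3, -3, 4, -4]
--
--    Raise :exc:`TypeError` when *l* is neither list nor tuple::
--
--       abjad> mathtools.cumulative_sums_zero('foo')
--       TypeError
--
--    Raise :exc:`ValueError` when *l* is empty::
--
--       abjad> mathtools.cumulative_sums_zero([ ])
--       ValueError'''
--
--
--    if not isinstance(l, (list, tuple)):
--       raise TypeError
--
--    if len(l) == 0:
--       raise ValueError
--
--    result = [0]
--    for element in l:
--       result.append(result[-1] + element)
--
--    return result
-- ===== SOURCE B (Python) =====
-- def cumulative_sums_zero(l):
--    if not isinstance(l, (list, tuple)):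
--       raise TypeError
--
--    if len(l) == 0:
--       raise ValueError
--
--    return [sum(l[:i]) for i in range(len(l) + 1)]
-- ===== Notes on version B (the rewrite author's own statement) =====
-- stated objective: alternative
-- what changed: B computes each cumulative sum independently as the sum of the prefix l[:i] over indices 0..len(l), instead of threading a running total and appending to the previous last element.
import Mathlib
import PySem

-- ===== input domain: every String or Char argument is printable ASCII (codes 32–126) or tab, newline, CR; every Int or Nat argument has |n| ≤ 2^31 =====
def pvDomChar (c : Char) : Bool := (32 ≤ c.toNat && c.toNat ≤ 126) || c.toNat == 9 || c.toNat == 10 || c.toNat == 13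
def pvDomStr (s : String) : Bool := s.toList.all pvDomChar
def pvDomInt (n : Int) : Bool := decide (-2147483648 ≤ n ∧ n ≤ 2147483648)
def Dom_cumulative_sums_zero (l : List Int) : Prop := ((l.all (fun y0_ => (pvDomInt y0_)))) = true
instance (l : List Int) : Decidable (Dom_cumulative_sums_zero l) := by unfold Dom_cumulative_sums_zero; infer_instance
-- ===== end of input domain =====

-- B replaces A's running-total loop by an independent prefix sum per index (alternative decomposition, not faster).

-- ===== PORT A =====
-- result = [0]; for element in l: result.append(result[-1] + element)
-- result[-1] is getLastD 0: exact, since result is never empty here.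
def cumulative_sums_zero (l : List Int) : List Int :=
  l.foldl (fun result element => result ++ [result.getLastD 0 + element]) [0]

-- ===== PORT B =====
-- [sum(l[:i]) for i in range(len(l) + 1)]; l[:i] with 0 ≤ i is List.take i (exact).
def cumulative_sums_zero_alt (l : List Int) : List Int :=
  (List.range (l.length + 1)).map (fun i => (l.take i).sum)

-- ===== PRECONDITION & SPEC =====
-- Pre_ excludes exactly the empty list, on which the Python A raises ValueError.
def Pre_cumulative_sums_zero (l : List Int) : Prop := l ≠ []
instance (l : List Int) : Decidable (Pre_cumulative_sums_zero l) := by unfold Pre_cumulative_sums_zero; infer_instance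
def pvWitness_cumulative_sums_zero : List Int := [1, -2, 3]

def Spec_cumulative_sums_zero (l : List Int) (out : List Int) : Prop := out = cumulative_sums_zero_alt l
instance (l : List Int) (out : List Int) : Decidable (Spec_cumulative_sums_zero l out) := by unfold Spec_cumulative_sums_zero; infer_instance

-- ===== CLAIM (what is proved, stated in full; the proofs are below) =====
def Claim_equal_cumulative_sums_zero : Prop := ∀ (l : List Int), Dom_cumulative_sums_zero l → Pre_cumulative_sums_zero l → Spec_cumulative_sums_zero l (cumulative_sums_zero l)

-- ===== LEMMAS AND PROOFS =====

-- Invariant of A's loop: starting from any nonempty accumulator whose last element is s,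
-- the loop appends s + (sum of the first i+1 elements) for each i.
theorem csz_foldl_inv (l : List Int) : ∀ (acc : List Int) (s : Int), acc.getLastD 0 = s →
    l.foldl (fun result element => result ++ [result.getLastD 0 + element]) acc
      = acc ++ (List.range l.length).map (fun i => s + (l.take (i + 1)).sum) := by
  induction l with
  | nil => intro acc s _; simp
  | cons e t ih =>
    intro acc s hs
    have hlast : (acc ++ [s + e]).getLastD 0 = s + e := by simp
    calc (e :: t).foldl (fun result element => result ++ [result.getLastD 0 + element]) acc
        = t.foldl (fun result element => result ++ [result.getLastD 0 + element]) (acc ++ [acc.getLastD 0 + e]) := rfl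
      _ = (acc ++ [s + e]) ++ (List.range t.length).map (fun i => (s + e) + (t.take (i + 1)).sum) := by
          rw [hs]; exact ih (acc ++ [s + e]) (s + e) hlast
      _ = acc ++ (List.range (e :: t).length).map (fun i => s + ((e :: t).take (i + 1)).sum) := by
          simp [List.range_succ_eq_map, List.map_map, Function.comp_def, add_assoc]

-- ===== VERDICT (by name: the statement is the Claim_ definition above) =====
theorem cumulative_sums_zero_spec : Claim_equal_cumulative_sums_zero := by
  intro l _ _
  unfold Spec_cumulative_sums_zero cumulative_sums_zero cumulative_sums_zero_alt
  rw [csz_foldl_inv l [0] 0 rfl]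
  simp [List.range_succ_eq_map, List.map_map, Function.comp_def]
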